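-- pv_equiv track=rewrite | github.com/Huch0/algorithm_community | huch0/PCCP/[PCCP 기출문제] 1번 - 붕대 감기/sequential.py | solution
-- ===== SOURCE A (Python) =====
-- def solution(bandage, health, attacks):
--     t, x, y = bandage
--     cur_hp = max_hp = health
--     heal_time = 0  # consecutive heal time
--     prev_time = 0  # previous attack time
--
--     for atk_time, damage in attacks:
--         heal_time += (atk_time - prev_time) - 1
--
--         # cur_hp = heal over time + additional heal
--         # cur_hp can't exceeds max_hp
--         cur_hp = min(max_hp, cur_hp + heal_time * x + (heal_time // t) * y)
--         cur_hp -= damage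
--
--         if cur_hp <= 0:  # Die
--             return -1
--
--         heal_time = 0  # set 0 as it's attacked
--         prev_time = atk_time
--
--     return cur_hp
-- ===== SOURCE B (Python) =====
-- def solution(bandage, health, attacks):
--     # Different algorithm: instead of re-capping hp with min() at every attack,
--     # unfold the recurrence hp_i = min(H, hp_{i-1} + r_i) - d_i into the closed form
--     # hp_i = H + S_i - M_i, where S_i is the prefix sum of (regen - damage) and
--     # M_i = max(0, max_{k<=i}(S_k + d_k)); keep S and M as running values.
--     t, x, y = bandage
--     s = m = 0
--     prev = 0
--     for a, d in attacks:
--         g = a - prev - 1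
--         s += g * x + (g // t) * y - d
--         m = max(m, s + d)
--         if health + s - m <= 0:
--             return -1
--         prev = a
--     return health + s - m
-- ===== Notes on version B (the rewrite author's own statement) =====
-- stated objective: alternative
-- what changed: B replaces A's per-attack capped-hp accumulator (min(max_hp, hp + regen) - damage) by an algebraically unfolded closed form: it maintains a prefix sum S of (regen - damage) and a running max M of (S_k + damage_k, 0), and the hp after attack i is exactly health + S - M, so no min/cap operation appears in the loop.
import Mathlib
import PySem

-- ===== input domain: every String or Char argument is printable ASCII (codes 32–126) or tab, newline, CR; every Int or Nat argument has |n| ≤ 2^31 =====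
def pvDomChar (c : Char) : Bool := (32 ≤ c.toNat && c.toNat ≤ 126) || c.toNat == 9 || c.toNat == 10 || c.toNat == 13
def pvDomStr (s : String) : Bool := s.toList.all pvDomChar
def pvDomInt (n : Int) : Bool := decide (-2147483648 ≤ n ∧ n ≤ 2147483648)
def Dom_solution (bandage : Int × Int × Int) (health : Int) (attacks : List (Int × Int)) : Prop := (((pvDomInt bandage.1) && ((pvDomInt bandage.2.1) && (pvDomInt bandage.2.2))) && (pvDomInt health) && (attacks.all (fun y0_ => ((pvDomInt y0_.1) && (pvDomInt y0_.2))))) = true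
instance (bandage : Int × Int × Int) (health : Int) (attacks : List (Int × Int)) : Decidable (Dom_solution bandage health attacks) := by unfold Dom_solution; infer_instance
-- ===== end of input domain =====

-- B replaces A's min-capped hp accumulator by the unfolded closed form hp = health + S - M
-- (prefix sum S of regen-minus-damage, running max M), removing the cap from the loop (objective: alternative).

-- ===== PORT A =====
-- A's for-loop with early return, carrying cur_hp / heal_time / prev_time
def solutionGoA (t x y max_hp cur_hp heal_time prev_time : Int) : List (Int × Int) → Int
  | [] => cur_hp
  | (atk_time, damage) :: rest =>
    -- heal_time += (atk_time - prev_time) - 1; cur_hp = min(max_hp, cur_hp + ht*x + (ht//t)*y) - damage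
    if min max_hp (cur_hp + (heal_time + ((atk_time - prev_time) - 1)) * x
         + PySem.Int.floordiv (heal_time + ((atk_time - prev_time) - 1)) t * y) - damage ≤ 0 then -1
    else solutionGoA t x y max_hp
      (min max_hp (cur_hp + (heal_time + ((atk_time - prev_time) - 1)) * x
         + PySem.Int.floordiv (heal_time + ((atk_time - prev_time) - 1)) t * y) - damage)
      0 atk_time rest

def solution (bandage : Int × Int × Int) (health : Int) (attacks : List (Int × Int)) : Int :=
  solutionGoA bandage.1 bandage.2.1 bandage.2.2 health health 0 0 attacks

-- ===== PORT B =====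
-- B's loop: s = prefix sum of (g*x + (g//t)*y - d), m = running max of (s + d, 0); hp = health + s - m
def solutionGoB (t x y health s m prev : Int) : List (Int × Int) → Int
  | [] => health + s - m
  | (a, d) :: rest =>
    if health + (s + ((a - prev - 1) * x + PySem.Int.floordiv (a - prev - 1) t * y - d))
        - max m ((s + ((a - prev - 1) * x + PySem.Int.floordiv (a - prev - 1) t * y - d)) + d) ≤ 0
    then -1
    else solutionGoB t x y health
      (s + ((a - prev - 1) * x + PySem.Int.floordiv (a - prev - 1) t * y - d))
      (max m ((s + ((a - prev - 1) * x + PySem.Int.floordiv (a - prev - 1) t * y - d)) + d))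
      a rest

def solution_alt (bandage : Int × Int × Int) (health : Int) (attacks : List (Int × Int)) : Int :=
  solutionGoB bandage.1 bandage.2.1 bandage.2.2 health 0 0 0 attacks

-- ===== PRECONDITION & SPEC =====
-- Pre_ excludes exactly the inputs where Python A raises ZeroDivisionError (t == 0 with at
-- least one attack); B raises there too.
def Pre_solution (bandage : Int × Int × Int) (health : Int) (attacks : List (Int × Int)) : Prop :=
  attacks = [] ∨ bandage.1 ≠ 0
instance (bandage : Int × Int × Int) (health : Int) (attacks : List (Int × Int)) : Decidable (Pre_solution bandage health attacks) := by unfold Pre_solution; infer_instance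
def pvWitness_solution : (Int × Int × Int) × Int × (List (Int × Int)) := ((5, 1, 5), 30, [(2, 10), (9, 15), (10, 5), (11, 5)])

def Spec_solution (bandage : Int × Int × Int) (health : Int) (attacks : List (Int × Int)) (out : Int) : Prop := out = solution_alt bandage health attacks
instance (bandage : Int × Int × Int) (health : Int) (attacks : List (Int × Int)) (out : Int) : Decidable (Spec_solution bandage health attacks out) := by unfold Spec_solution; infer_instance

-- ===== CLAIM (what is proved, stated in full; the proofs are below) =====
def Claim_equal_solution : Prop := ∀ (bandage : Int × Int × Int) (health : Int) (attacks : List (Int × Int)), Dom_solution bandage health attacks → Pre_solution bandage health attacks → Spec_solution bandage health attacks (solution bandage health attacks)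

-- ===== LEMMAS AND PROOFS =====

-- Invariant: A's cur_hp equals B's health + s - m; both loops then agree step by step.
lemma goA_eq_goB (t x y H s m p : Int) (l : List (Int × Int)) :
    solutionGoA t x y H (H + s - m) 0 p l = solutionGoB t x y H s m p l := by
  induction l generalizing s m p with
  | nil => simp [solutionGoA, solutionGoB]
  | cons hd tl ih =>
    obtain ⟨a, d⟩ := hd
    simp only [solutionGoA, solutionGoB]
    rw [show (0 : Int) + ((a - p) - 1) = a - p - 1 from by ring]
    have h : min H (H + s - m + (a - p - 1) * x + PySem.Int.floordiv (a - p - 1) t * y) - d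
        = H + (s + ((a - p - 1) * x + PySem.Int.floordiv (a - p - 1) t * y - d))
          - max m ((s + ((a - p - 1) * x + PySem.Int.floordiv (a - p - 1) t * y - d)) + d) := by
      generalize (a - p - 1) * x = u
      generalize PySem.Int.floordiv (a - p - 1) t * y = v
      omega
    rw [h]
    split
    · rfl
    · exact ih _ _ a

-- ===== VERDICT (by name: the statement is the Claim_ definition above) =====
theorem solution_spec : Claim_equal_solution := by
  intro bandage health attacks _ _
  unfold Spec_solution solution solution_alt
  have := goA_eq_goB bandage.1 bandage.2.1 bandage.2.2 health 0 0 0 attacks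
  simpa using this
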